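-- pv_equiv track=rewrite | github.com/WurabeSeiji/ai-chat-logs-open | BH熱力学プログラム/computations/jacobi_verification.py | N_from_jacobi
-- ===== SOURCE A (Python) =====
-- def N_from_jacobi(k: int) -> int:
--     """Compute N(k) using the Jacobi four-square machinery, by enumerating
--     odd positive integer tuples (p1,...,p4) with sum p_i^2 ≤ (4k+2)^2."""
--     target = (4 * k + 2) ** 2
--     total = 0
--     # The original positive-orthant count weighted by sign multiplicity:
--     #   N(k) = Σ over (p1,...,p4) ∈ {1,3,5,...}^4 with Σ p_i^2 ≤ target of 2^{#{i : p_i > 1}}.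
--     # Equivalently, in terms of integer (positive or negative) odd p_i with sum p_i^2 ≤ target,
--     # the count in Z^4 of tuples is r4_odd(N) summed over N. We must relate this to N(k).
--     # The mapping is:
--     #   c_i ∈ Z, p_i := 2|c_i|+1 ∈ {1,3,5,...}.
--     #   For each (c_1,...,c_4), we get one (p_1,...,p_4) with p_i ≥ 1 odd.
--     #   Conversely, given (p_1,...,p_4) ∈ {1,3,...}^4 (positive odd), the # of c's is
--     #     2^{#{i : p_i > 1}}  (sign flexibility of c_i when c_i ≠ 0).
--     # So N(k) = Σ over positive odd 4-tuples of 2^{#{i : p_i > 1}}.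
--     for p1 in range(1, 4*k+3, 2):
--         s1 = p1*p1
--         if s1 > target:
--             break
--         for p2 in range(1, 4*k+3, 2):
--             s2 = s1 + p2*p2
--             if s2 > target:
--                 break
--             for p3 in range(1, 4*k+3, 2):
--                 s3 = s2 + p3*p3
--                 if s3 > target:
--                     break
--                 for p4 in range(1, 4*k+3, 2):
--                     s4 = s3 + p4*p4
--                     if s4 > target:
--                         break
--                     nz = sum(1 for p in (p1,p2,p3,p4) if p > 1)
--                     total += 1 << nz
--     return total
-- ===== SOURCE B (Python) =====
-- def N_from_jacobi(k: int) -> int: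
--     """Same weighted count, via a histogram of two-odd-square sums convolved
--     with its own prefix sums in one linear pass (O(k^2) instead of O(k^4))."""
--     target = (4 * k + 2) ** 2
--     odds = [p for p in range(1, 4 * k + 3, 2) if p * p <= target]
--     if not odds:
--         return 0
--     # weighted histogram: cnt[s] = sum over odd pairs (p,q), p^2+q^2 == s, of w(p)*w(q)
--     cnt = {}
--     for p in odds:
--         wp = 2 if p > 1 else 1
--         for q in odds:
--             s = p * p + q * q
--             if s <= target:
--                 cnt[s] = cnt.get(s, 0) + wp * (2 if q > 1 else 1)
--     # N(k) = sum_{s+s' <= target} cnt[s]*cnt[s'] : running prefix sum paired with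
--     # the mirrored index target - s in a single ascending pass.
--     total = 0
--     running = 0
--     for s in range(target + 1):
--         running += cnt.get(s, 0)
--         total += cnt.get(target - s, 0) * running
--     return total
-- ===== Notes on version B (the rewrite author's own statement) =====
-- stated objective: faster
-- what changed: Replaces the four nested break-loops over odd 4-tuples by building a weighted histogram of two-odd-square sums (a dict) and convolving it with its own running prefix sum in a single ascending pass.
import Mathlib
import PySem

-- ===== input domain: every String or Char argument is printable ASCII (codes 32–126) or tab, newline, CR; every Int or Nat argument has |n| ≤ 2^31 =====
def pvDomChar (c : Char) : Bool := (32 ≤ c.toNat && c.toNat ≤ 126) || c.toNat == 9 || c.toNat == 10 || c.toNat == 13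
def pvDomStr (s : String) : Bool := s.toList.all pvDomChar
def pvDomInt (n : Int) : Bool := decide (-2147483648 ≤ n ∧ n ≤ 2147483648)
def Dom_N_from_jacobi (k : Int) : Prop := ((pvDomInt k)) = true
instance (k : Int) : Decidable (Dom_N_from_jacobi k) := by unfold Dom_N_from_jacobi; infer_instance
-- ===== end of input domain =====

-- B replaces A's four nested break-loops over odd 4-tuples by a weighted histogram of
-- two-odd-square sums convolved with its own running prefix sum (objective: faster, O(k^2) vs O(k^4)).

-- ===== PORT A =====
-- A-side helper: a Python 'for x in xs: if m(x) > t: break; total = g(x, total)' loop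
def pvBreakSum (t : Int) (m : Int → Int) (g : Int → Int → Int) : List Int → Int → Int
  | [], total => total
  | p :: ps, total => if m p > t then total else pvBreakSum t m g ps (g p total)

def N_from_jacobi (k : Int) : Int :=
  let target := (4 * k + 2) ^ 2
  pvBreakSum target (fun p1 => p1 * p1)
    (fun p1 total =>
      pvBreakSum target (fun p2 => p1 * p1 + p2 * p2)
        (fun p2 total =>
          pvBreakSum target (fun p3 => p1 * p1 + p2 * p2 + p3 * p3)
            (fun p3 total =>
              pvBreakSum target (fun p4 => p1 * p1 + p2 * p2 + p3 * p3 + p4 * p4)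
                (fun p4 total =>
                  total + ((1 : Int) <<< ([p1, p2, p3, p4].countP (fun p => decide (p > 1)))))
                (PySem.List.pyRange 1 (4 * k + 3) 2) total)
            (PySem.List.pyRange 1 (4 * k + 3) 2) total)
        (PySem.List.pyRange 1 (4 * k + 3) 2) total)
    (PySem.List.pyRange 1 (4 * k + 3) 2) 0

-- ===== PORT B =====
def N_from_jacobi_alt (k : Int) : Int :=
  let target := (4 * k + 2) ^ 2
  let odds := (PySem.List.pyRange 1 (4 * k + 3) 2).filter (fun p => p * p ≤ target)
  if odds = [] then 0
  else
    let cnt : PySem.Dict Int Int := odds.foldl (fun d p =>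
      let wp : Int := if p > 1 then 2 else 1
      odds.foldl (fun d q =>
        let s := p * p + q * q
        if s ≤ target then d.insert s (d.getD s 0 + wp * (if q > 1 then 2 else 1)) else d) d)
      PySem.Dict.empty
    let res := (PySem.List.pyRange 0 (target + 1) 1).foldl (fun (tr : Int × Int) s =>
      let running := tr.2 + cnt.getD s 0
      (tr.1 + cnt.getD (target - s) 0 * running, running)) (0, 0)
    res.1

-- ===== PRECONDITION & SPEC =====
def Spec_N_from_jacobi (k : Int) (out : Int) : Prop := out = N_from_jacobi_alt k
instance (k : Int) (out : Int) : Decidable (Spec_N_from_jacobi k out) := by unfold Spec_N_from_jacobi; infer_instance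

-- ===== CLAIM (what is proved, stated in full; the proofs are below) =====
def Claim_equal_N_from_jacobi : Prop := ∀ (k : Int), Dom_N_from_jacobi k → Spec_N_from_jacobi k (N_from_jacobi k)

-- ===== LEMMAS AND PROOFS =====

def pvW (p : Int) : Int := if p > 1 then 2 else 1
def pvR (k : Int) : List Int := PySem.List.pyRange 1 (4 * k + 3) 2
def pvT (k : Int) : Int := (4 * k + 2) ^ 2
def pvM (k : Int) : Int :=
  ((pvR k).map (fun p1 => ((pvR k).map (fun p2 => ((pvR k).map (fun p3 => ((pvR k).map (fun p4 =>
    if p1*p1 + p2*p2 + p3*p3 + p4*p4 ≤ pvT k then pvW p1 * pvW p2 * (pvW p3 * pvW p4)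
    else 0)).sum)).sum)).sum)).sum
def pvC (k x : Int) : Int :=
  ((pvR k).map (fun p => ((pvR k).map (fun q =>
    if p*p + q*q ≤ pvT k ∧ p*p + q*q = x then pvW p * pvW q else 0)).sum)).sum
def pvG (k s : Int) : Int :=
  ((pvR k).map (fun p => ((pvR k).map (fun q =>
    if p*p + q*q ≤ s then pvW p * pvW q else 0)).sum)).sum

lemma pv_sum_swap {α β : Type} (L : List α) (M : List β) (h : α → β → Int) :
    (L.map (fun u => (M.map (h u)).sum)).sum
      = (M.map (fun p => (L.map (fun u => h u p)).sum)).sum := by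
  induction L with
  | nil => simp
  | cons u L ih =>
      simp only [List.map_cons, List.sum_cons, ih, ← PySem.List.sum_map_add_int]

lemma pv_sum_ite_eqf (L : List Int) (hnd : L.Nodup) (x : Int) (W : Int → Int) :
    (L.map (fun u => if x = u then W u else 0)).sum = if x ∈ L then W x else 0 := by
  induction L with
  | nil => simp
  | cons u L ih =>
      rcases List.nodup_cons.mp hnd with ⟨hu, hnd'⟩
      simp only [List.map_cons, List.sum_cons, ih hnd', List.mem_cons]
      by_cases hx : x = u
      · subst hx; simp [hu]
      · simp [hx]

lemma pv_ite_push {c : Prop} [Decidable c] {α : Type} (L : List α) (f : α → Int) :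
    (if c then (L.map f).sum else 0) = (L.map (fun y => if c then f y else 0)).sum := by
  by_cases hc : c <;> simp [hc]

lemma pv_filter_map_sum {α : Type} (L : List α) (c : α → Bool) (f : α → Int) :
    ((L.filter c).map f).sum = (L.map (fun x => if c x then f x else 0)).sum := by
  induction L with
  | nil => simp
  | cons u L ih => by_cases hc : c u <;> simp [hc, ih]

lemma pvBreakSum_eq (t : Int) (m : Int → Int) (g : Int → Int → Int) (h : Int → Int)
    (hg : ∀ p tot, g p tot = tot + h p) :
    ∀ (xs : List Int), xs.Pairwise (fun a b => m a ≤ m b) → ∀ tot,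
      pvBreakSum t m g xs tot = tot + ((xs.filter (fun p => decide (m p ≤ t))).map h).sum := by
  intro xs
  induction xs with
  | nil => intro _ tot; simp [pvBreakSum]
  | cons p ps ih =>
      intro hpw tot
      rcases List.pairwise_cons.mp hpw with ⟨hhd, htl⟩
      by_cases hm : m p > t
      · have hfil : (p :: ps).filter (fun p => decide (m p ≤ t)) = [] := by
          rw [List.filter_eq_nil_iff]
          intro a ha
          rcases List.mem_cons.mp ha with rfl | ha
          · simpa using hm
          · have := hhd a ha; simp only [decide_eq_true_eq]; omega
        simp [pvBreakSum, hm, hfil]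
      · have hle : m p ≤ t := by omega
        simp only [pvBreakSum, if_neg hm, ih htl, hg, List.filter_cons,
          decide_eq_true_eq, if_pos hle, List.map_cons, List.sum_cons]
        ring

lemma pv_r_mem {k p : Int} (hp : p ∈ pvR k) : 1 ≤ p ∧ p ≤ 4 * k + 1 := by
  rw [pvR, PySem.List.mem_pyRange_iff_of_pos (by norm_num)] at hp
  rcases hp with ⟨h1, h2, h3⟩
  rcases h3 with ⟨c, hc⟩
  omega

lemma pv_r_lt (k : Int) : (pvR k).Pairwise (· < ·) := by
  rw [pvR, PySem.List.pyRange_of_pos _ _ (by norm_num)]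
  apply List.pairwise_lt_range.map (f := fun j : Nat => (1:Int) + 2 * j)
  intro a b hab
  simp only []
  omega

lemma pv_r_sq_le {k p : Int} (hp : p ∈ pvR k) : p * p ≤ pvT k := by
  rcases pv_r_mem hp with ⟨h1, h2⟩
  rw [pvT]; nlinarith

lemma pv_shift_count (p1 p2 p3 p4 : Int) :
    ((1 : Int) <<< ([p1, p2, p3, p4].countP (fun p => decide (p > 1))))
      = pvW p1 * pvW p2 * (pvW p3 * pvW p4) := by
  simp only [List.countP_cons, List.countP_nil, pvW, decide_eq_true_eq]
  split_ifs <;> rfl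

lemma pv_A_eq (k : Int) : N_from_jacobi k = pvM k := by
  have hr : PySem.List.pyRange 1 (4 * k + 3) 2 = pvR k := rfl
  have hpw : ∀ (f : Int → Int), (∀ a b, 1 ≤ a → a < b → f a ≤ f b) →
      (pvR k).Pairwise (fun a b => f a ≤ f b) :=
    fun f hf => List.Pairwise.imp_of_mem (fun ha hb hab => hf _ _ (pv_r_mem ha).1 hab) (pv_r_lt k)
  simp only [N_from_jacobi, hr]
  set t := (4 * k + 2) ^ 2 with ht
  have h4 : ∀ p1 p2 p3 tot,
      pvBreakSum t (fun p4 => p1*p1 + p2*p2 + p3*p3 + p4*p4)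
        (fun p4 total => total + ((1 : Int) <<< ([p1, p2, p3, p4].countP (fun p => decide (p > 1)))))
        (pvR k) tot
      = tot + (((pvR k).filter (fun p4 => decide (p1*p1 + p2*p2 + p3*p3 + p4*p4 ≤ t))).map
          (fun p4 => (1 : Int) <<< ([p1, p2, p3, p4].countP (fun p => decide (p > 1))))).sum := by
    intro p1 p2 p3 tot
    exact pvBreakSum_eq t _ _ _ (fun p tot => rfl) (pvR k)
      (hpw _ (fun a b h1 h2 => by nlinarith)) tot
  have h3 : ∀ p1 p2 tot,
      pvBreakSum t (fun p3 => p1*p1 + p2*p2 + p3*p3)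
        (fun p3 total =>
          pvBreakSum t (fun p4 => p1*p1 + p2*p2 + p3*p3 + p4*p4)
            (fun p4 total => total + ((1 : Int) <<< ([p1, p2, p3, p4].countP (fun p => decide (p > 1)))))
            (pvR k) total) (pvR k) tot
      = tot + (((pvR k).filter (fun p3 => decide (p1*p1 + p2*p2 + p3*p3 ≤ t))).map
          (fun p3 => (((pvR k).filter (fun p4 => decide (p1*p1 + p2*p2 + p3*p3 + p4*p4 ≤ t))).map
            (fun p4 => (1 : Int) <<< ([p1, p2, p3, p4].countP (fun p => decide (p > 1))))).sum)).sum := by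
    intro p1 p2 tot
    exact pvBreakSum_eq t _ _ _ (fun p tot => h4 p1 p2 p tot) (pvR k)
      (hpw _ (fun a b h1 h2 => by nlinarith)) tot
  have h2 : ∀ p1 tot,
      pvBreakSum t (fun p2 => p1*p1 + p2*p2)
        (fun p2 total =>
          pvBreakSum t (fun p3 => p1*p1 + p2*p2 + p3*p3)
            (fun p3 total =>
              pvBreakSum t (fun p4 => p1*p1 + p2*p2 + p3*p3 + p4*p4)
                (fun p4 total => total + ((1 : Int) <<< ([p1, p2, p3, p4].countP (fun p => decide (p > 1)))))
                (pvR k) total) (pvR k) total) (pvR k) tot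
      = tot + (((pvR k).filter (fun p2 => decide (p1*p1 + p2*p2 ≤ t))).map
          (fun p2 => (((pvR k).filter (fun p3 => decide (p1*p1 + p2*p2 + p3*p3 ≤ t))).map
            (fun p3 => (((pvR k).filter (fun p4 => decide (p1*p1 + p2*p2 + p3*p3 + p4*p4 ≤ t))).map
              (fun p4 => (1 : Int) <<< ([p1, p2, p3, p4].countP (fun p => decide (p > 1))))).sum)).sum)).sum := by
    intro p1 tot
    exact pvBreakSum_eq t _ _ _ (fun p tot => h3 p1 p tot) (pvR k)
      (hpw _ (fun a b h1 h2 => by nlinarith)) tot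
  have h1 :
      pvBreakSum t (fun p1 => p1*p1)
        (fun p1 total =>
          pvBreakSum t (fun p2 => p1*p1 + p2*p2)
            (fun p2 total =>
              pvBreakSum t (fun p3 => p1*p1 + p2*p2 + p3*p3)
                (fun p3 total =>
                  pvBreakSum t (fun p4 => p1*p1 + p2*p2 + p3*p3 + p4*p4)
                    (fun p4 total => total + ((1 : Int) <<< ([p1, p2, p3, p4].countP (fun p => decide (p > 1)))))
                    (pvR k) total) (pvR k) total) (pvR k) total) (pvR k) 0
      = 0 + (((pvR k).filter (fun p1 => decide (p1*p1 ≤ t))).map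
          (fun p1 => (((pvR k).filter (fun p2 => decide (p1*p1 + p2*p2 ≤ t))).map
            (fun p2 => (((pvR k).filter (fun p3 => decide (p1*p1 + p2*p2 + p3*p3 ≤ t))).map
              (fun p3 => (((pvR k).filter (fun p4 => decide (p1*p1 + p2*p2 + p3*p3 + p4*p4 ≤ t))).map
                (fun p4 => (1 : Int) <<< ([p1, p2, p3, p4].countP (fun p => decide (p > 1))))).sum)).sum)).sum)).sum :=
    pvBreakSum_eq t _ _ _ (fun p tot => h2 p tot) (pvR k)
      (hpw _ (fun a b h1 h2 => by nlinarith)) 0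
  rw [h1, zero_add]
  simp only [pv_filter_map_sum, pvM, pvT, ← ht, decide_eq_true_eq]
  refine congrArg List.sum (List.map_congr_left ?_)
  intro p1 hp1
  by_cases hc1 : p1*p1 ≤ t
  swap
  · rw [if_neg hc1]
    symm; apply List.sum_eq_zero; intro x hx
    rcases List.mem_map.mp hx with ⟨p2, hp2, rfl⟩
    apply List.sum_eq_zero; intro y hy
    rcases List.mem_map.mp hy with ⟨p3, hp3, rfl⟩
    apply List.sum_eq_zero; intro z hz
    rcases List.mem_map.mp hz with ⟨p4, hp4, rfl⟩
    rw [if_neg]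
    have := mul_self_nonneg p2; have := mul_self_nonneg p3; have := mul_self_nonneg p4
    intro h; exact hc1 (by linarith)
  · rw [if_pos hc1]
    refine congrArg List.sum (List.map_congr_left ?_)
    intro p2 hp2
    by_cases hc2 : p1*p1 + p2*p2 ≤ t
    swap
    · rw [if_neg hc2]
      symm; apply List.sum_eq_zero; intro y hy
      rcases List.mem_map.mp hy with ⟨p3, hp3, rfl⟩
      apply List.sum_eq_zero; intro z hz
      rcases List.mem_map.mp hz with ⟨p4, hp4, rfl⟩
      rw [if_neg]
      have := mul_self_nonneg p3; have := mul_self_nonneg p4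
      intro h; exact hc2 (by linarith)
    · rw [if_pos hc2]
      refine congrArg List.sum (List.map_congr_left ?_)
      intro p3 hp3
      by_cases hc3 : p1*p1 + p2*p2 + p3*p3 ≤ t
      swap
      · rw [if_neg hc3]
        symm; apply List.sum_eq_zero; intro z hz
        rcases List.mem_map.mp hz with ⟨p4, hp4, rfl⟩
        rw [if_neg]
        have := mul_self_nonneg p4
        intro h; exact hc3 (by linarith)
      · rw [if_pos hc3]
        refine congrArg List.sum (List.map_congr_left ?_)
        intro p4 hp4
        rw [pv_shift_count]

lemma pv_cnt_inner (t wp p : Int) :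
    ∀ (ys : List Int) (d : PySem.Dict Int Int) (x : Int),
      ((ys.foldl (fun d q => if p*p + q*q ≤ t
          then d.insert (p*p + q*q) (d.getD (p*p + q*q) 0 + wp * (if q > 1 then 2 else 1))
          else d) d).getD x 0)
        = d.getD x 0 + (ys.map (fun q =>
            if p*p + q*q ≤ t ∧ p*p + q*q = x then wp * (if q > 1 then 2 else 1) else 0)).sum := by
  intro ys
  induction ys with
  | nil => intro d x; simp
  | cons q ys ih =>
      intro d x
      simp only [List.foldl_cons, List.map_cons, List.sum_cons]
      by_cases hc : p*p + q*q ≤ t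
      · rw [if_pos hc, ih]
        rw [PySem.Dict.getD_insert]
        by_cases hx : x = p*p + q*q
        · subst hx
          rw [if_pos rfl, if_pos (And.intro hc rfl)]
          ring
        · rw [if_neg hx, if_neg (fun h => hx h.2.symm)]
          ring
      · rw [if_neg hc, ih, if_neg (fun h => hc h.1)]
        ring

lemma pv_cnt_outer (t : Int) (ys : List Int) :
    ∀ (ps : List Int) (d : PySem.Dict Int Int) (x : Int),
      ((ps.foldl (fun d p =>
          ys.foldl (fun d q => if p*p + q*q ≤ t
            then d.insert (p*p + q*q) (d.getD (p*p + q*q) 0 + (if p > 1 then (2:Int) else 1) * (if q > 1 then 2 else 1))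
            else d) d) d).getD x 0)
        = d.getD x 0 + (ps.map (fun p => (ys.map (fun q =>
            if p*p + q*q ≤ t ∧ p*p + q*q = x
            then (if p > 1 then (2:Int) else 1) * (if q > 1 then 2 else 1) else 0)).sum)).sum := by
  intro ps
  induction ps with
  | nil => intro d x; simp
  | cons p ps ih =>
      intro d x
      simp only [List.foldl_cons, List.map_cons, List.sum_cons]
      rw [ih, pv_cnt_inner]
      ring

lemma pv_combine (f g : Int → Int) :
    ∀ (n : Nat) (a r : Int),
      ((PySem.List.pyRange 0 (n : Int) 1).foldl
          (fun (tr : Int × Int) s => (tr.1 + g s * (tr.2 + f s), tr.2 + f s)) (a, r))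
        = (a + ((PySem.List.pyRange 0 (n : Int) 1).map (fun s =>
              g s * (r + ((PySem.List.pyRange 0 (s + 1) 1).map f).sum))).sum,
           r + ((PySem.List.pyRange 0 (n : Int) 1).map f).sum) := by
  intro n
  induction n with
  | zero => intro a r; simp [PySem.List.pyRange_zero]
  | succ n ih =>
      intro a r
      have hcast : ((n + 1 : Nat) : Int) = (n : Int) + 1 := by push_cast; ring
      rw [hcast, PySem.List.pyRange_one_succ_right (by positivity), List.foldl_append,
        List.map_append, List.map_append, ih]
      simp only [List.foldl_cons, List.foldl_nil, List.map_cons, List.map_nil,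
        List.sum_append, List.sum_cons, List.sum_nil]
      have hsp : (List.map f (PySem.List.pyRange 0 ((n:Int) + 1) 1)).sum
          = (List.map f (PySem.List.pyRange 0 (n:Int) 1)).sum + f (n:Int) := by
        rw [PySem.List.pyRange_one_succ_right (by positivity)]
        simp
      rw [Prod.mk.injEq, hsp]
      constructor <;> ring

lemma pv_B_eq (k : Int) (hk : 0 ≤ k) :
    N_from_jacobi_alt k
      = ((PySem.List.pyRange 0 (pvT k + 1) 1).map (fun s =>
          pvC k (pvT k - s) * ((PySem.List.pyRange 0 (s + 1) 1).map (pvC k)).sum)).sum := by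
  have hr : PySem.List.pyRange 1 (4 * k + 3) 2 = pvR k := rfl
  have hT : (4 * k + 2) ^ 2 = pvT k := rfl
  have h1mem : (1 : Int) ∈ pvR k := by
    rw [pvR, PySem.List.mem_pyRange_iff_of_pos (by norm_num)]
    exact ⟨le_refl 1, by omega, ⟨0, by ring⟩⟩
  have hfil : (pvR k).filter (fun p => decide (p * p ≤ (4 * k + 2) ^ 2)) = pvR k := by
    apply List.filter_eq_self.mpr
    intro p hp
    exact decide_eq_true (pv_r_sq_le hp)
  have hnn : (0:Int) ≤ (4 * k + 2) ^ 2 + 1 := by positivity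
  have hn : ((((4 * k + 2) ^ 2 + 1).toNat : Int)) = (4 * k + 2) ^ 2 + 1 := Int.toNat_of_nonneg hnn
  simp only [N_from_jacobi_alt, hr, hfil]
  rw [if_neg (List.ne_nil_of_mem h1mem)]
  have hC : ∀ x : Int,
      (((pvR k).foldl (fun d p =>
          (pvR k).foldl (fun d q => if p*p + q*q ≤ (4*k+2)^2
            then d.insert (p*p + q*q) (d.getD (p*p + q*q) 0 + (if p > 1 then (2:Int) else 1) * (if q > 1 then 2 else 1))
            else d) d) PySem.Dict.empty).getD x 0) = pvC k x := by
    intro x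
    rw [pv_cnt_outer]
    simp only [pvC, pvW, pvT]
    simp
  simp only [hC]
  rw [← hn, pv_combine (fun s => pvC k s) (fun s => pvC k ((4*k+2)^2 - s))]
  simp only [hT, zero_add]
  rw [show (((pvT k + 1).toNat : Int)) = pvT k + 1 from Int.toNat_of_nonneg (by positivity)]

lemma pv_pre (k s : Int) (hst : s ≤ pvT k) :
    ((PySem.List.pyRange 0 (s + 1) 1).map (pvC k)).sum = pvG k s := by
  rw [show List.map (pvC k) (PySem.List.pyRange 0 (s + 1) 1)
      = List.map (fun u => ((pvR k).map (fun p => ((pvR k).map (fun q =>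
          if p*p + q*q ≤ pvT k ∧ p*p + q*q = u then pvW p * pvW q else 0)).sum)).sum)
          (PySem.List.pyRange 0 (s + 1) 1) from rfl, pvG]
  rw [pv_sum_swap]
  refine congrArg List.sum (List.map_congr_left ?_)
  intro p hp
  rw [pv_sum_swap]
  refine congrArg List.sum (List.map_congr_left ?_)
  intro q hq
  have hppos := (pv_r_mem hp).1
  have hqpos := (pv_r_mem hq).1
  have h2 : 2 ≤ p*p + q*q := by nlinarith
  by_cases hss : p*p + q*q ≤ s
  · have hc : p*p + q*q ≤ pvT k := le_trans hss hst
    have hstep : (List.map (fun u => if p*p + q*q ≤ pvT k ∧ p*p + q*q = u then pvW p * pvW q else 0)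
          (PySem.List.pyRange 0 (s + 1) 1))
        = (List.map (fun u => if p*p + q*q = u then pvW p * pvW q else 0)
          (PySem.List.pyRange 0 (s + 1) 1)) := by
      refine List.map_congr_left ?_
      intro u _
      by_cases he : p*p + q*q = u
      · subst he
        rw [if_pos (And.intro hc rfl), if_pos rfl]
      · rw [if_neg (fun h => he h.2), if_neg he]
    rw [hstep, pv_sum_ite_eqf _ (PySem.List.nodup_pyRange_one 0 (s+1)),
      if_pos (PySem.List.mem_pyRange_one.mpr ⟨by omega, by omega⟩), if_pos hss]
  · rw [if_neg hss]
    apply List.sum_eq_zero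
    intro x hx
    rcases List.mem_map.mp hx with ⟨u, hu, rfl⟩
    have hub := (PySem.List.mem_pyRange_one.mp hu).2
    rw [if_neg]
    intro h
    omega

lemma pv_conv (k : Int) (hk : 0 ≤ k) :
    ((PySem.List.pyRange 0 (pvT k + 1) 1).map (fun s =>
        pvC k (pvT k - s) * ((PySem.List.pyRange 0 (s + 1) 1).map (pvC k)).sum)).sum
      = pvM k := by
  have ht0 : (0:Int) ≤ pvT k := by rw [pvT]; positivity
  -- step 1: replace the prefix sum by pvG and push the product inside the pair sums
  have hstep1 : (List.map (fun s =>
        pvC k (pvT k - s) * ((PySem.List.pyRange 0 (s + 1) 1).map (pvC k)).sum)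
        (PySem.List.pyRange 0 (pvT k + 1) 1))
      = List.map (fun s => ((pvR k).map (fun p1 => ((pvR k).map (fun p2 =>
          if p1*p1 + p2*p2 ≤ pvT k ∧ p1*p1 + p2*p2 = pvT k - s
          then pvW p1 * pvW p2 * pvG k s else 0)).sum)).sum)
        (PySem.List.pyRange 0 (pvT k + 1) 1) := by
    refine List.map_congr_left ?_
    intro s hs
    have hsb := PySem.List.mem_pyRange_one.mp hs
    rw [pv_pre k s (by omega), pvC]
    rw [← List.sum_map_mul_right]
    refine congrArg List.sum (List.map_congr_left ?_)
    intro p1 _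
    rw [← List.sum_map_mul_right]
    refine congrArg List.sum (List.map_congr_left ?_)
    intro p2 _
    rw [ite_mul, zero_mul]
  rw [hstep1, pv_sum_swap]
  simp only [pvM]
  refine congrArg List.sum (List.map_congr_left ?_)
  intro p1 hp1
  rw [pv_sum_swap]
  refine congrArg List.sum (List.map_congr_left ?_)
  intro p2 hp2
  -- inner sum over s picks s = pvT k - (p1² + p2²)
  have h1pos := (pv_r_mem hp1).1
  have h2pos := (pv_r_mem hp2).1
  have h12 : 2 ≤ p1*p1 + p2*p2 := by nlinarith
  have hpick : (List.map (fun s =>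
        if p1*p1 + p2*p2 ≤ pvT k ∧ p1*p1 + p2*p2 = pvT k - s
        then pvW p1 * pvW p2 * pvG k s else 0) (PySem.List.pyRange 0 (pvT k + 1) 1)).sum
      = (if p1*p1 + p2*p2 ≤ pvT k
          then pvW p1 * pvW p2 * pvG k (pvT k - (p1*p1 + p2*p2)) else 0) := by
    have hcongr : (List.map (fun s =>
          if p1*p1 + p2*p2 ≤ pvT k ∧ p1*p1 + p2*p2 = pvT k - s
          then pvW p1 * pvW p2 * pvG k s else 0) (PySem.List.pyRange 0 (pvT k + 1) 1))
        = (List.map (fun s =>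
          if pvT k - (p1*p1 + p2*p2) = s
          then (if p1*p1 + p2*p2 ≤ pvT k then pvW p1 * pvW p2 * pvG k s else 0) else 0)
          (PySem.List.pyRange 0 (pvT k + 1) 1)) := by
      refine List.map_congr_left ?_
      intro s _
      by_cases he : pvT k - (p1*p1 + p2*p2) = s
      · have he' : p1*p1 + p2*p2 = pvT k - s := by omega
        simp [he']
      · have he' : ¬ (p1*p1 + p2*p2 = pvT k - s) := by omega
        simp [he, he']
    rw [hcongr, pv_sum_ite_eqf _ (PySem.List.nodup_pyRange_one 0 (pvT k + 1))]
    by_cases hc : p1*p1 + p2*p2 ≤ pvT k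
    · rw [if_pos (PySem.List.mem_pyRange_one.mpr ⟨by omega, by omega⟩), if_pos hc]
    · simp [hc]
  rw [hpick]
  -- expand pvG and fuse the two conditions
  rw [pvG, ← List.sum_map_mul_left, pv_ite_push]
  refine congrArg List.sum (List.map_congr_left ?_)
  intro p3 hp3
  rw [← List.sum_map_mul_left, pv_ite_push]
  refine congrArg List.sum (List.map_congr_left ?_)
  intro p4 hp4
  have h3pos := (pv_r_mem hp3).1
  have h4pos := (pv_r_mem hp4).1
  have h34 : 2 ≤ p3*p3 + p4*p4 := by nlinarith
  by_cases hc : p1*p1 + p2*p2 + p3*p3 + p4*p4 ≤ pvT k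
  · have hc1 : p1*p1 + p2*p2 ≤ pvT k := by linarith
    have hc2 : p3*p3 + p4*p4 ≤ pvT k - (p1*p1 + p2*p2) := by linarith
    rw [if_pos hc1, if_pos hc2, if_pos hc]
  · rw [if_neg hc]
    by_cases hc1 : p1*p1 + p2*p2 ≤ pvT k
    · rw [if_pos hc1, if_neg (show ¬ (p3*p3 + p4*p4 ≤ pvT k - (p1*p1 + p2*p2)) from fun h => hc (by linarith))]
      ring
    · rw [if_neg hc1]

lemma pv_neg (k : Int) (hk : k < 0) : N_from_jacobi k = 0 ∧ N_from_jacobi_alt k = 0 := by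
  have hr0 : PySem.List.pyRange 1 (4 * k + 3) 2 = [] := by
    rw [PySem.List.pyRange_of_pos _ _ (by norm_num)]
    have h : ¬((1:Int) < 4 * k + 3) := by omega
    simp [h]
  constructor
  · simp only [N_from_jacobi, hr0]
    rfl
  · simp only [N_from_jacobi_alt, hr0]
    simp

-- ===== VERDICT (by name: the statement is the Claim_ definition above) =====
theorem N_from_jacobi_spec : Claim_equal_N_from_jacobi := by
  intro k _
  unfold Spec_N_from_jacobi
  rcases lt_or_ge k 0 with hk | hk
  · rw [(pv_neg k hk).1, (pv_neg k hk).2]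
  · rw [pv_A_eq, pv_B_eq k hk, pv_conv k hk]
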